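-- pv_equiv track=rewrite | github.com/Suraj757/SJ-Learning-Profile | Learning-Profile-Remix/main.py | get_milestone_focus
-- ===== SOURCE A (Python) =====
-- def get_milestone_focus(scores):
--     """Determine which milestone categories to focus on based on scores."""
--     # Return 2-3 categories to focus on - including both strengths and growth areas
--     strengths = [cat for cat, score in scores.items() if score == "High"]
--     growth_areas = [cat for cat, score in scores.items() if score == "Low"]
--
--     focus_areas = []
--     # Add 1-2 strengths to build upon
--     if strengths:
--         focus_areas.extend(strengths[:2])
--
--     # Add 1 growth area to develop
--     if growth_areas:
--         focus_areas.append(growth_areas[0])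
--
--     # If we don't have 3 areas yet, add from medium areas
--     if len(focus_areas) < 3:
--         medium_areas = [cat for cat, score in scores.items() if score == "Medium"]
--         focus_areas.extend(medium_areas[:3-len(focus_areas)])
--
--     # If still not enough, add more from the remaining categories
--     all_categories = list(scores.keys())
--     while len(focus_areas) < 3 and all_categories:
--         if all_categories[0] not in focus_areas:
--             focus_areas.append(all_categories[0])
--         all_categories.pop(0)
--
--     return focus_areas[:3]  # Return up to 3 focus areas
-- ===== SOURCE B (Python) =====
-- def get_milestone_focus(scores):
--     """Determine which milestone categories to focus on based on scores."""
--     # Assign each category a priority rank in one pass (0 = first two Highs,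
--     # 1 = first Low, 2 = any Medium, 3 = everything else), then stably sort
--     # by rank and take the top three.
--     ranked = []
--     highs_seen = 0
--     low_seen = False
--     for cat, score in scores.items():
--         if score == "High" and highs_seen < 2:
--             rank = 0
--             highs_seen += 1
--         elif score == "Low" and not low_seen:
--             rank = 1
--             low_seen = True
--         elif score == "Medium":
--             rank = 2
--         else:
--             rank = 3
--         ranked.append((rank, cat))
--     ranked.sort(key=lambda rc: rc[0])  # stable: original order kept within a rank
--     return [cat for _, cat in ranked[:3]]
-- ===== Notes on version B (the rewrite author's own statement) =====
-- stated objective: alternative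
-- what changed: Replaces A's staged length-checked extends (High slice, Low append, Medium fill, while/pop dedup catch-all) with a one-pass rank assignment (0=first two Highs, 1=first Low, 2=Medium, 3=rest) followed by a stable sort on the rank and taking the first three.
import Mathlib
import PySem

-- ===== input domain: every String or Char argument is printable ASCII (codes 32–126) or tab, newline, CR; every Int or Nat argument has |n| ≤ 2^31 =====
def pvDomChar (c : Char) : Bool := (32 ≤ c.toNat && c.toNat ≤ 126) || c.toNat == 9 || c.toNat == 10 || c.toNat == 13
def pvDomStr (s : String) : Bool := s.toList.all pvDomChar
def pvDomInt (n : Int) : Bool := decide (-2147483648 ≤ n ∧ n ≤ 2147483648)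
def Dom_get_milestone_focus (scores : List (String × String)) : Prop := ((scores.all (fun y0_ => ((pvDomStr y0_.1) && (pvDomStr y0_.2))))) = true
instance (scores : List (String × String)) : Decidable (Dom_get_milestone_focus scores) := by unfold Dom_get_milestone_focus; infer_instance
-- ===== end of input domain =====

-- B replaces A's staged length-checked extends and while/pop catch-all with a one-pass rank
-- assignment followed by a stable sort on the rank, taking the first three (objective: alternative).


-- ===== PORT A =====
-- 'while len(focus_areas) < 3 and all_categories: pop(0), append if absent'
def pvWhileA (focus : List String) : List String → List String
  | [] => focus
  | c :: rest =>
    if focus.length < 3 then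
      if c ∈ focus then pvWhileA focus rest else pvWhileA (focus ++ [c]) rest
    else focus

-- the Python function receives a dict; PySem.Dict.ofList models building that dict from the pairs
def get_milestone_focus (scores : List (String × String)) : List String :=
  let d := PySem.Dict.ofList scores
  let strengths := (d.items.filter (fun p => p.2 == "High")).map (fun p => p.1)
  let growth_areas := (d.items.filter (fun p => p.2 == "Low")).map (fun p => p.1)
  let focus1 := if strengths.isEmpty then [] else strengths.take 2
  -- 'if growth_areas: focus_areas.append(growth_areas[0])'; headD is safe under the guard
  let focus2 := if growth_areas.isEmpty then focus1 else focus1 ++ [growth_areas.headD ""]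
  let focus3 := if focus2.length < 3 then
      focus2 ++ ((d.items.filter (fun p => p.2 == "Medium")).map (fun p => p.1)).take (3 - focus2.length)
    else focus2
  (pvWhileA focus3 d.keys).take 3

-- ===== PORT B =====
-- B's ranking loop: rank 0 = first two Highs, 1 = first Low, 2 = Medium, 3 = everything else
def pvRankLoop (hs : Nat) (ls : Bool) : List (String × String) → List (Int × String)
  | [] => []
  | p :: rest =>
    if p.2 == "High" && decide (hs < 2) then (0, p.1) :: pvRankLoop (hs + 1) ls rest
    else if p.2 == "Low" && !ls then (1, p.1) :: pvRankLoop hs true rest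
    else if p.2 == "Medium" then (2, p.1) :: pvRankLoop hs ls rest
    else (3, p.1) :: pvRankLoop hs ls rest

def get_milestone_focus_alt (scores : List (String × String)) : List String :=
  let d := PySem.Dict.ofList scores
  let ranked := pvRankLoop 0 false d.items
  (((PySem.List.sorted ranked (fun rc => rc.1)).take 3).map (fun rc => rc.2))

-- ===== PRECONDITION & SPEC =====
def Spec_get_milestone_focus (scores : List (String × String)) (out : List String) : Prop := out = get_milestone_focus_alt scores
instance (scores : List (String × String)) (out : List String) : Decidable (Spec_get_milestone_focus scores out) := by unfold Spec_get_milestone_focus; infer_instance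

-- ===== CLAIM (what is proved, stated in full; the proofs are below) =====
def Claim_equal_get_milestone_focus : Prop := ∀ (scores : List (String × String)), Dom_get_milestone_focus scores → Spec_get_milestone_focus scores (get_milestone_focus scores)

-- ===== LEMMAS AND PROOFS =====

-- B's single dedup-and-cap loop, used as the common normal form of both sides
def pvBLoop (result : List String) : List String → List String
  | [] => result
  | c :: rest =>
    if result.length = 3 then result
    else if c ∈ result then pvBLoop result rest
    else pvBLoop (result ++ [c]) rest

-- grp v items = [cat for cat, score in items if score == v]
def pvGrp (v : String) (items : List (String × String)) : List String :=
  (items.filter (fun p => p.2 == v)).map (fun p => p.1)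

theorem pvBLoop_of_length_three (r : List String) (xs : List String) (h : r.length = 3) :
    pvBLoop r xs = r := by
  cases xs with
  | nil => rfl
  | cons c rest => simp [pvBLoop, h]


theorem pvBLoop_append (r xs ys : List String) :
    pvBLoop r (xs ++ ys) = pvBLoop (pvBLoop r xs) ys := by
  induction xs generalizing r with
  | nil => rfl
  | cons c rest ih =>
    by_cases h3 : r.length = 3
    · simp [pvBLoop, h3, pvBLoop_of_length_three _ _ h3]
    · by_cases hm : c ∈ r
      · simp [pvBLoop, h3, hm, ih]
      · simp [pvBLoop, h3, hm, ih]

theorem pvBLoop_disjoint (r xs : List String) (hr : r.length ≤ 3) (hnd : xs.Nodup)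
    (hdisj : ∀ x ∈ xs, x ∉ r) :
    pvBLoop r xs = r ++ xs.take (3 - r.length) := by
  induction xs generalizing r with
  | nil => simp [pvBLoop]
  | cons c rest ih =>
    by_cases h3 : r.length = 3
    · simp [pvBLoop, h3]
    · have hlt : r.length < 3 := by omega
      have hcm : c ∉ r := hdisj c (by simp)
      have hnd' : rest.Nodup := hnd.of_cons
      have hcnr : c ∉ rest := by
        intro hc; exact (List.nodup_cons.mp hnd).1 hc
      have hdisj' : ∀ x ∈ rest, x ∉ r ++ [c] := by
        intro x hx
        simp only [List.mem_append, List.mem_singleton]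
        rintro (hxr | rfl)
        · exact hdisj x (by simp [hx]) hxr
        · exact hcnr hx
      have := ih (r ++ [c]) (by simp; omega) hnd' hdisj'
      rw [pvBLoop, if_neg h3, if_neg hcm, this]
      have htk : (c :: rest).take (3 - r.length) = c :: rest.take (3 - (r ++ [c]).length) := by
        have : 3 - r.length = (3 - (r ++ [c]).length) + 1 := by simp; omega
        rw [this, List.take_succ_cons]
      rw [htk]
      simp

theorem pvBLoop_length_le (r xs : List String) (hr : r.length ≤ 3) :
    (pvBLoop r xs).length ≤ 3 := by
  induction xs generalizing r with
  | nil => simp [pvBLoop]; omega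
  | cons c rest ih =>
    by_cases h3 : r.length = 3
    · simpa [pvBLoop, h3]
    · by_cases hm : c ∈ r
      · simpa [pvBLoop, h3, hm] using ih r hr
      · have : (r ++ [c]).length ≤ 3 := by simp; omega
        simpa [pvBLoop, h3, hm] using ih (r ++ [c]) this

theorem pvWhileA_eq_pvBLoop (focus cats : List String) (h : focus.length ≤ 3) :
    pvWhileA focus cats = pvBLoop focus cats := by
  induction cats generalizing focus with
  | nil => rfl
  | cons c rest ih =>
    by_cases h3 : focus.length = 3
    · simp [pvWhileA, pvBLoop, h3]
    · have hlt : focus.length < 3 := by omega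
      by_cases hm : c ∈ focus
      · simp [pvWhileA, pvBLoop, hlt, (by simpa using h3 : ¬ focus.length = 3), hm, ih focus h]
      · simp [pvWhileA, pvBLoop, hlt, (by simpa using h3 : ¬ focus.length = 3), hm,
          ih (focus ++ [c]) (by simp; omega)]

-- keys of l are pairwise distinct → equal first components force equal pairs
theorem pv_key_inj (l : List (String × String)) (hnd : (l.map Prod.fst).Nodup)
    {p q : String × String} (hp : p ∈ l) (hq : q ∈ l) (h : p.1 = q.1) : p = q := by
  have := List.inj_on_of_nodup_map hnd
  exact this hp hq h

theorem pv_mem_group (l : List (String × String)) (v x : String)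
    (hx : x ∈ pvGrp v l) :
    ∃ p ∈ l, p.1 = x ∧ p.2 = v := by
  simp only [pvGrp, List.mem_map, List.mem_filter, beq_iff_eq] at hx
  obtain ⟨p, ⟨hpl, hpv⟩, hpx⟩ := hx
  exact ⟨p, hpl, hpx, hpv⟩

theorem pv_group_disjoint (l : List (String × String)) (hnd : (l.map Prod.fst).Nodup)
    (v w : String) (hvw : v ≠ w) (x : String)
    (hx : x ∈ pvGrp v l) :
    x ∉ pvGrp w l := by
  intro hy
  obtain ⟨p, hpl, hpx, hpv⟩ := pv_mem_group l v x hx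
  obtain ⟨q, hql, hqx, hqw⟩ := pv_mem_group l w x hy
  have : p = q := pv_key_inj l hnd hpl hql (hpx.trans hqx.symm)
  exact hvw (by rw [← hpv, this, hqw])

theorem pv_group_nodup (l : List (String × String)) (hnd : (l.map Prod.fst).Nodup)
    (v : String) : (pvGrp v l).Nodup := by
  have hsub : List.Sublist ((l.filter (fun p => p.2 == v)).map (fun p => p.1)) (l.map (fun p => p.1)) :=
    List.Sublist.map _ List.filter_sublist
  exact hnd.sublist hsub

-- A's four stages compute pvBLoop over the candidate stream (over arbitrary disjoint groups)
theorem pv_main (H L M K : List String) (hHnd : H.Nodup) (hLnd : L.Nodup) (hMnd : M.Nodup)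
    (hLH : ∀ x ∈ L, x ∉ H) (hMH : ∀ x ∈ M, x ∉ H) (hML : ∀ x ∈ M, x ∉ L) :
    (pvWhileA
      (let focus1 := if H.isEmpty then [] else H.take 2
       let focus2 := if L.isEmpty then focus1 else focus1 ++ [L.headD ""]
       if focus2.length < 3 then focus2 ++ M.take (3 - focus2.length) else focus2)
      K).take 3
    = pvBLoop [] (H.take 2 ++ L.take 1 ++ M ++ K) := by
  have hfocus1 : (if H.isEmpty then ([] : List String) else H.take 2) = H.take 2 := by
    cases H <;> simp
  have hfocus2 : (if L.isEmpty then H.take 2 else H.take 2 ++ [L.headD ""]) = H.take 2 ++ L.take 1 := by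
    cases L <;> simp
  have hlen2 : (H.take 2 ++ L.take 1).length ≤ 3 := by
    simp [List.length_take]; omega
  have hfocus3 : (if (H.take 2 ++ L.take 1).length < 3 then
        (H.take 2 ++ L.take 1) ++ M.take (3 - (H.take 2 ++ L.take 1).length)
      else (H.take 2 ++ L.take 1))
      = (H.take 2 ++ L.take 1) ++ M.take (3 - (H.take 2 ++ L.take 1).length) := by
    by_cases h : (H.take 2 ++ L.take 1).length < 3
    · rw [if_pos h]
    · have h3 : (H.take 2 ++ L.take 1).length = 3 := by omega
      rw [if_neg h, h3]
      simp
  have hsplit : pvBLoop [] (H.take 2 ++ L.take 1 ++ M ++ K)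
      = pvBLoop (pvBLoop (pvBLoop (pvBLoop [] (H.take 2)) (L.take 1)) M) K := by
    rw [pvBLoop_append, pvBLoop_append, pvBLoop_append]
  have hs1 : pvBLoop [] (H.take 2) = H.take 2 := by
    rw [pvBLoop_disjoint [] (H.take 2) (by simp) (hHnd.sublist (List.take_sublist _ _)) (by simp)]
    simp [List.take_take]
  have hs2 : pvBLoop (H.take 2) (L.take 1) = H.take 2 ++ L.take 1 := by
    rw [pvBLoop_disjoint (H.take 2) (L.take 1)
        (by simp only [List.length_take]; omega)
        (hLnd.sublist (List.take_sublist _ _))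
        (fun x hx hxr => hLH x (List.mem_of_mem_take hx) (List.mem_of_mem_take hxr))]
    congr 1
    apply List.take_of_length_le
    simp only [List.length_take]
    omega
  have hs3 : pvBLoop (H.take 2 ++ L.take 1) M
      = (H.take 2 ++ L.take 1) ++ M.take (3 - (H.take 2 ++ L.take 1).length) := by
    refine pvBLoop_disjoint _ _ hlen2 hMnd ?_
    intro x hx
    simp only [List.mem_append]
    rintro (hxr | hxr)
    · exact hMH x hx (List.mem_of_mem_take hxr)
    · exact hML x hx (List.mem_of_mem_take hxr)
  have hflen : ((H.take 2 ++ L.take 1) ++ M.take (3 - (H.take 2 ++ L.take 1).length)).length ≤ 3 := by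
    simp only [List.length_append, List.length_take]
    omega
  simp only [hfocus1, hfocus2, hfocus3]
  rw [pvWhileA_eq_pvBLoop _ _ hflen, hsplit, hs1, hs2, hs3,
    List.take_of_length_le (pvBLoop_length_le _ _ hflen)]


-- ---- B side: stable sort on a {0,1,2,3}-valued rank is bucket concatenation ----

theorem pv_insertBy_skip (b : Int × String → Int × String → Bool) (x : Int × String)
    (P S : List (Int × String)) (hP : ∀ p ∈ P, b x p = false) :
    PySem.List.insertBy b x (P ++ S) = P ++ PySem.List.insertBy b x S := by
  induction P with
  | nil => rfl
  | cons p rest ih =>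
    have hb : b x p = false := hP p (by simp)
    simp only [List.cons_append, PySem.List.insertBy, hb]
    simp [ih (fun q hq => hP q (by simp [hq]))]

theorem pv_insertBy_front (b : Int × String → Int × String → Bool) (x : Int × String)
    (S : List (Int × String)) (hS : ∀ s ∈ S, b x s = true) :
    PySem.List.insertBy b x S = x :: S := by
  cases S with
  | nil => rfl
  | cons s rest => simp [PySem.List.insertBy, hS s (by simp)]

theorem pv_rank_mem (items : List (String × String)) (hs : Nat) (ls : Bool)
    (rc : Int × String) (h : rc ∈ pvRankLoop hs ls items) :
    rc.1 = 0 ∨ rc.1 = 1 ∨ rc.1 = 2 ∨ rc.1 = 3 := by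
  induction items generalizing hs ls with
  | nil => simp [pvRankLoop] at h
  | cons p rest ih =>
    simp only [pvRankLoop] at h
    split at h
    · rcases List.mem_cons.mp h with h | h
      · left; simp [h]
      · exact ih _ _ h
    · split at h
      · rcases List.mem_cons.mp h with h | h
        · right; left; simp [h]
        · exact ih _ _ h
      · split at h
        · rcases List.mem_cons.mp h with h | h
          · right; right; left; simp [h]
          · exact ih _ _ h
        · rcases List.mem_cons.mp h with h | h
          · right; right; right; simp [h]
          · exact ih _ _ h

theorem pv_sorted_buckets (l : List (Int × String))
    (h : ∀ rc ∈ l, rc.1 = 0 ∨ rc.1 = 1 ∨ rc.1 = 2 ∨ rc.1 = 3) :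
    PySem.List.sorted l (fun rc => rc.1) =
      l.filter (fun rc => rc.1 == 0) ++ l.filter (fun rc => rc.1 == 1) ++
      l.filter (fun rc => rc.1 == 2) ++ l.filter (fun rc => rc.1 == 3) := by
  induction l using List.reverseRecOn with
  | nil => simp [PySem.List.sorted]
  | append_singleton l x ih =>
    have hstep : PySem.List.sorted (l ++ [x]) (fun rc => rc.1)
        = PySem.List.insertBy (fun a b => decide (a.1 < b.1)) x
            (PySem.List.sorted l (fun rc => rc.1)) := by
      rw [PySem.List.sorted_eq_foldl_insertBy, PySem.List.sorted_eq_foldl_insertBy,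
        List.foldl_append]
      rfl
    have hl : ∀ rc ∈ l, rc.1 = 0 ∨ rc.1 = 1 ∨ rc.1 = 2 ∨ rc.1 = 3 :=
      fun rc hrc => h rc (by simp [hrc])
    have hmemf : ∀ (i : Int) (y : Int × String), y ∈ l.filter (fun rc => rc.1 == i) → y.1 = i := by
      intro i y hy
      simpa using (List.mem_filter.mp hy).2
    rw [hstep, ih hl]
    have hx := h x (by simp)
    rcases hx with hx | hx | hx | hx
    · -- rank 0: insert at end of bucket 0
      rw [show l.filter (fun rc => rc.1 == 0) ++ l.filter (fun rc => rc.1 == 1) ++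
            l.filter (fun rc => rc.1 == 2) ++ l.filter (fun rc => rc.1 == 3)
          = l.filter (fun rc => rc.1 == 0) ++ (l.filter (fun rc => rc.1 == 1) ++
            l.filter (fun rc => rc.1 == 2) ++ l.filter (fun rc => rc.1 == 3)) by simp]
      rw [pv_insertBy_skip _ _ _ _ (by
        intro p hp; have := hmemf 0 p hp; simp [this, hx])]
      rw [pv_insertBy_front _ _ _ (by
        intro s hs
        rcases List.mem_append.mp hs with hs | hs
        · rcases List.mem_append.mp hs with hs | hs
          · have := hmemf 1 s hs; simp [this, hx]
          · have := hmemf 2 s hs; simp [this, hx]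
        · have := hmemf 3 s hs; simp [this, hx])]
      simp [List.filter_append, hx]
    · rw [show l.filter (fun rc => rc.1 == 0) ++ l.filter (fun rc => rc.1 == 1) ++
            l.filter (fun rc => rc.1 == 2) ++ l.filter (fun rc => rc.1 == 3)
          = (l.filter (fun rc => rc.1 == 0) ++ l.filter (fun rc => rc.1 == 1)) ++
            (l.filter (fun rc => rc.1 == 2) ++ l.filter (fun rc => rc.1 == 3)) by simp]
      rw [pv_insertBy_skip _ _ _ _ (by
        intro p hp
        rcases List.mem_append.mp hp with hp | hp
        · have := hmemf 0 p hp; simp [this, hx]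
        · have := hmemf 1 p hp; simp [this, hx])]
      rw [pv_insertBy_front _ _ _ (by
        intro s hs
        rcases List.mem_append.mp hs with hs | hs
        · have := hmemf 2 s hs; simp [this, hx]
        · have := hmemf 3 s hs; simp [this, hx])]
      simp [List.filter_append, hx]
    · rw [show l.filter (fun rc => rc.1 == 0) ++ l.filter (fun rc => rc.1 == 1) ++
            l.filter (fun rc => rc.1 == 2) ++ l.filter (fun rc => rc.1 == 3)
          = (l.filter (fun rc => rc.1 == 0) ++ l.filter (fun rc => rc.1 == 1) ++
            l.filter (fun rc => rc.1 == 2)) ++ l.filter (fun rc => rc.1 == 3) by simp]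
      rw [pv_insertBy_skip _ _ _ _ (by
        intro p hp
        rcases List.mem_append.mp hp with hp | hp
        · rcases List.mem_append.mp hp with hp | hp
          · have := hmemf 0 p hp; simp [this, hx]
          · have := hmemf 1 p hp; simp [this, hx]
        · have := hmemf 2 p hp; simp [this, hx])]
      rw [pv_insertBy_front _ _ _ (by
        intro s hs; have := hmemf 3 s hs; simp [this, hx])]
      simp [List.filter_append, hx]
    · rw [PySem.List.insertBy_of_forall_not_before _ _ _ (by
        intro p hp
        rcases List.mem_append.mp hp with hp | hp
        · rcases List.mem_append.mp hp with hp | hp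
          · rcases List.mem_append.mp hp with hp | hp
            · have := hmemf 0 p hp; simp [this, hx]
            · have := hmemf 1 p hp; simp [this, hx]
          · have := hmemf 2 p hp; simp [this, hx]
        · have := hmemf 3 p hp; simp [this, hx])]
      simp [List.filter_append, hx]

-- ---- the four rank buckets, keyed back to A's groups ----

theorem pv_bucket0 (items : List (String × String)) (hs : Nat) (ls : Bool) :
    ((pvRankLoop hs ls items).filter (fun rc => rc.1 == 0)).map (fun rc => rc.2)
      = (pvGrp "High" items).take (2 - hs) := by
  induction items generalizing hs ls with
  | nil => simp [pvRankLoop, pvGrp]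
  | cons p rest ih =>
    by_cases hH : p.2 = "High"
    · by_cases hhs : hs < 2
      · have h2 : 2 - hs = (2 - (hs + 1)) + 1 := by omega
        simp only [pvRankLoop, hH, hhs]
        simp [pvGrp, List.filter_cons, hH, h2, ih, List.take_succ_cons]
      · have hhs2 : hs ≥ 2 := by omega
        have h0 : 2 - hs = 0 := by omega
        have h0' : 2 - (hs : Nat) = 0 := h0
        simp only [pvRankLoop, hH, hhs]
        simp [pvGrp, List.filter_cons, hH, h0, ih, hhs]
    · simp only [pvRankLoop]
      by_cases hL : p.2 = "Low" <;> by_cases hM : p.2 = "Medium" <;>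
        first
        | (exact absurd (hL ▸ hM) (by decide))
        | (cases ls <;> simp [pvGrp, List.filter_cons, hH, hL, hM, ih])

theorem pv_bucket1 (items : List (String × String)) (hs : Nat) (ls : Bool) :
    ((pvRankLoop hs ls items).filter (fun rc => rc.1 == 1)).map (fun rc => rc.2)
      = (pvGrp "Low" items).take (if ls then 0 else 1) := by
  induction items generalizing hs ls with
  | nil => simp [pvRankLoop, pvGrp]
  | cons p rest ih =>
    by_cases hL : p.2 = "Low"
    · have hH : ¬ p.2 = "High" := by rw [hL]; decide
      cases ls with
      | false =>
        simp only [pvRankLoop, hL, hH]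
        simp [pvGrp, List.filter_cons, hL, hH, ih, List.take_succ_cons]
      | true =>
        simp only [pvRankLoop, hL, hH]
        simp [pvGrp, List.filter_cons, hL, hH, ih]
    · simp only [pvRankLoop]
      by_cases hH : p.2 = "High" <;> by_cases hM : p.2 = "Medium" <;>
        first
        | (exact absurd (hH ▸ hM) (by decide))
        | (by_cases hhs : hs < 2 <;> cases ls <;>
            simp [pvGrp, List.filter_cons, hH, hL, hM, hhs, ih])

theorem pv_bucket2 (items : List (String × String)) (hs : Nat) (ls : Bool) :
    ((pvRankLoop hs ls items).filter (fun rc => rc.1 == 2)).map (fun rc => rc.2)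
      = pvGrp "Medium" items := by
  induction items generalizing hs ls with
  | nil => simp [pvRankLoop, pvGrp]
  | cons p rest ih =>
    simp only [pvRankLoop]
    by_cases hH : p.2 = "High" <;> by_cases hL : p.2 = "Low" <;> by_cases hM : p.2 = "Medium" <;>
      first
      | (exact absurd (hH ▸ hL) (by decide))
      | (exact absurd (hH ▸ hM) (by decide))
      | (exact absurd (hL ▸ hM) (by decide))
      | (by_cases hhs : hs < 2 <;> cases ls <;>
          simp [pvGrp, List.filter_cons, hH, hL, hM, hhs, ih])

theorem pv_bucket3 (items : List (String × String)) (hs : Nat) (ls : Bool)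
    (hnd : (items.map Prod.fst).Nodup) :
    ((pvRankLoop hs ls items).filter (fun rc => rc.1 == 3)).map (fun rc => rc.2)
      = (items.map Prod.fst).filter (fun k =>
          !(decide (k ∈ (pvGrp "High" items).take (2 - hs)) ||
            decide (k ∈ (pvGrp "Low" items).take (if ls then 0 else 1)) ||
            decide (k ∈ pvGrp "Medium" items))) := by
  induction items generalizing hs ls with
  | nil => simp [pvRankLoop, pvGrp]
  | cons p rest ih =>
    have hnd' : (rest.map Prod.fst).Nodup := (List.nodup_cons.mp hnd).2
    have hpnr : p.1 ∉ rest.map Prod.fst := (List.nodup_cons.mp hnd).1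
    have hpngrp : ∀ v, p.1 ∉ pvGrp v rest := by
      intro v hv
      obtain ⟨q, hql, hqx, _⟩ := pv_mem_group rest v p.1 hv
      exact hpnr (hqx ▸ List.mem_map_of_mem hql)
    have hne : ∀ k ∈ rest.map Prod.fst, k ≠ p.1 := fun k hk h => hpnr (h ▸ hk)
    have ihr := fun (a : Nat) (b : Bool) => ih a b hnd'
    by_cases hH : p.2 = "High"
    · have hgH : pvGrp "High" (p :: rest) = p.1 :: pvGrp "High" rest := by
        simp [pvGrp, List.filter_cons, hH]
      have hgL : pvGrp "Low" (p :: rest) = pvGrp "Low" rest := by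
        simp [pvGrp, List.filter_cons, hH]
      have hgM : pvGrp "Medium" (p :: rest) = pvGrp "Medium" rest := by
        simp [pvGrp, List.filter_cons, hH]
      by_cases hhs : hs < 2
      · -- rank 0: first 2-hs of the High group absorbs p.1
        have h2 : 2 - hs = (2 - (hs + 1)) + 1 := by omega
        rw [show pvRankLoop hs ls (p :: rest) = (0, p.1) :: pvRankLoop (hs + 1) ls rest by
          simp [pvRankLoop, hH, hhs]]
        rw [hgH, hgL, hgM, h2, List.take_succ_cons]
        rw [show ((p :: rest).map Prod.fst) = p.1 :: rest.map Prod.fst by simp]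
        rw [List.filter_cons, List.filter_cons]
        simp only [show ((0 : Int) == 3) = false by decide, List.mem_cons, true_or,
          decide_true, Bool.true_or, Bool.not_true, Bool.false_eq_true, eq_self_iff_true, if_false, if_true, cond_false]
        rw [ihr (hs + 1) ls]
        apply List.filter_congr
        intro k hk
        simp [hne k hk]
      · -- rank 3: hs is already 2, the High group is truncated to nothing
        have h0 : 2 - hs = 0 := by omega
        rw [show pvRankLoop hs ls (p :: rest) = (3, p.1) :: pvRankLoop hs ls rest by
          simp [pvRankLoop, hH, hhs]]
        rw [hgH, hgL, hgM, h0]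
        rw [show ((p :: rest).map Prod.fst) = p.1 :: rest.map Prod.fst by simp]
        rw [List.filter_cons, List.filter_cons]
        have hp1 : p.1 ∉ (pvGrp "Low" rest).take (if ls then 0 else 1) :=
          fun h => hpngrp "Low" (List.mem_of_mem_take h)
        simp only [show ((3 : Int) == 3) = true by decide, List.take_zero,
          List.not_mem_nil, decide_false, hp1, hpngrp "Medium", Bool.false_or,
          Bool.not_false, Bool.false_eq_true, eq_self_iff_true, if_false, if_true, cond_true, List.map_cons]
        rw [ihr hs ls, h0]
        simp
    · by_cases hL : p.2 = "Low"
      · have hgH : pvGrp "High" (p :: rest) = pvGrp "High" rest := by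
          simp [pvGrp, List.filter_cons, hL]
        have hgL : pvGrp "Low" (p :: rest) = p.1 :: pvGrp "Low" rest := by
          simp [pvGrp, List.filter_cons, hL]
        have hgM : pvGrp "Medium" (p :: rest) = pvGrp "Medium" rest := by
          simp [pvGrp, List.filter_cons, hL]
        cases ls with
        | false =>
          -- rank 1: the Low slot absorbs p.1
          rw [show pvRankLoop hs false (p :: rest) = (1, p.1) :: pvRankLoop hs true rest by
            simp [pvRankLoop, hH, hL]]
          rw [hgH, hgL, hgM]
          rw [show ((p :: rest).map Prod.fst) = p.1 :: rest.map Prod.fst by simp]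
          rw [List.filter_cons, List.filter_cons]
          simp only [show ((1 : Int) == 3) = false by decide, Bool.false_eq_true, eq_self_iff_true, if_false, if_true, cond_false]
          simp only [show (if false = true then 0 else 1) = 1 by decide, List.take_succ_cons,
            List.take_zero, List.mem_cons, List.mem_singleton, true_or, or_true,
            decide_true, Bool.or_true, Bool.true_or, Bool.not_true]
          rw [ihr hs true]
          simp
          apply List.filter_congr
          intro k hk
          simp [hne k hk]
        | true =>
          -- rank 3: the Low slot is already used
          rw [show pvRankLoop hs true (p :: rest) = (3, p.1) :: pvRankLoop hs true rest by
            simp [pvRankLoop, hH, hL]]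
          rw [hgH, hgL, hgM]
          rw [show ((p :: rest).map Prod.fst) = p.1 :: rest.map Prod.fst by simp]
          rw [List.filter_cons, List.filter_cons]
          have hp1 : p.1 ∉ (pvGrp "High" rest).take (2 - hs) :=
            fun h => hpngrp "High" (List.mem_of_mem_take h)
          simp only [show ((3 : Int) == 3) = true by decide,
            show (if true = true then 0 else 1) = 0 by decide, List.take_zero,
            List.not_mem_nil, decide_false, hp1, hpngrp "Medium", Bool.or_false,
            Bool.false_or, Bool.not_false, Bool.false_eq_true, eq_self_iff_true, if_false, if_true, cond_true, List.map_cons]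
          rw [ihr hs true]
          simp
      · by_cases hM : p.2 = "Medium"
        · -- rank 2: p.1 joins the Medium group
          have hgH : pvGrp "High" (p :: rest) = pvGrp "High" rest := by
            simp [pvGrp, List.filter_cons, hM]
          have hgL : pvGrp "Low" (p :: rest) = pvGrp "Low" rest := by
            simp [pvGrp, List.filter_cons, hM]
          have hgM : pvGrp "Medium" (p :: rest) = p.1 :: pvGrp "Medium" rest := by
            simp [pvGrp, List.filter_cons, hM]
          rw [show pvRankLoop hs ls (p :: rest) = (2, p.1) :: pvRankLoop hs ls rest by
            simp [pvRankLoop, hH, hL, hM]]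
          rw [hgH, hgL, hgM]
          rw [show ((p :: rest).map Prod.fst) = p.1 :: rest.map Prod.fst by simp]
          rw [List.filter_cons, List.filter_cons]
          simp only [show ((2 : Int) == 3) = false by decide, List.mem_cons, true_or,
            decide_true, Bool.or_true, Bool.not_true, Bool.false_eq_true, eq_self_iff_true, if_false, if_true, cond_false]
          rw [ihr hs ls]
          apply List.filter_congr
          intro k hk
          simp [hne k hk]
        · -- rank 3: p belongs to no group
          have hgH : pvGrp "High" (p :: rest) = pvGrp "High" rest := by
            simp [pvGrp, List.filter_cons, hH]
          have hgL : pvGrp "Low" (p :: rest) = pvGrp "Low" rest := by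
            simp [pvGrp, List.filter_cons, hL]
          have hgM : pvGrp "Medium" (p :: rest) = pvGrp "Medium" rest := by
            simp [pvGrp, List.filter_cons, hM]
          rw [show pvRankLoop hs ls (p :: rest) = (3, p.1) :: pvRankLoop hs ls rest by
            simp [pvRankLoop, hH, hL, hM]]
          rw [hgH, hgL, hgM]
          rw [show ((p :: rest).map Prod.fst) = p.1 :: rest.map Prod.fst by simp]
          rw [List.filter_cons, List.filter_cons]
          have hp1 : p.1 ∉ (pvGrp "High" rest).take (2 - hs) :=
            fun h => hpngrp "High" (List.mem_of_mem_take h)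
          have hp2 : p.1 ∉ (pvGrp "Low" rest).take (if ls then 0 else 1) :=
            fun h => hpngrp "Low" (List.mem_of_mem_take h)
          simp only [show ((3 : Int) == 3) = true by decide, hp1, hp2, hpngrp "Medium",
            decide_false, Bool.or_false, Bool.false_or, Bool.not_false,
            Bool.false_eq_true, eq_self_iff_true, if_false, if_true, cond_true, List.map_cons]
          rw [ihr hs ls]

-- dedup-and-cap over P ++ K equals P followed by the unseen keys, capped at 3
theorem pvY (K : List String) (hK : K.Nodup) (P : List String) (hP : P.length ≤ 3) :
    pvBLoop P K = P ++ (K.filter (fun k => !decide (k ∈ P))).take (3 - P.length) := by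
  induction K generalizing P with
  | nil => simp [pvBLoop]
  | cons c rest ih =>
    by_cases h3 : P.length = 3
    · simp [pvBLoop, h3, pvBLoop_of_length_three _ _ h3]
    · have hlt : P.length < 3 := by omega
      have hK' : rest.Nodup := hK.of_cons
      have hcnr : c ∉ rest := (List.nodup_cons.mp hK).1
      by_cases hc : c ∈ P
      · simp [pvBLoop, h3, hc, ih hK' P hP]
      · have hfc : rest.filter (fun k => !decide (k ∈ P ++ [c]))
            = rest.filter (fun k => !decide (k ∈ P)) := by
          apply List.filter_congr
          intro k hk
          have : k ≠ c := fun h => hcnr (h ▸ hk)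
          simp [List.mem_append, this]
        have hlen : (P ++ [c]).length ≤ 3 := by simp; omega
        have h1 : 3 - P.length = (3 - (P ++ [c]).length) + 1 := by simp; omega
        rw [pvBLoop, if_neg h3, if_neg hc, ih hK' (P ++ [c]) hlen, hfc]
        simp only [List.filter_cons, hc]
        rw [h1]
        simp [hc, List.take_succ_cons]

theorem pvZ (P K : List String) (hP : P.Nodup) (hK : K.Nodup) :
    pvBLoop [] (P ++ K) = (P ++ K.filter (fun k => !decide (k ∈ P))).take 3 := by
  rw [pvBLoop_append]
  rw [pvBLoop_disjoint [] P (by simp) hP (by simp)]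
  simp only [List.nil_append, List.length_nil, Nat.sub_zero]
  by_cases h : P.length ≤ 3
  · rw [List.take_of_length_le h, pvY K hK P h, List.take_append,
      List.take_of_length_le h]
  · have h3 : (P.take 3).length = 3 := by simp; omega
    rw [pvBLoop_of_length_three _ _ h3, List.take_append]
    have : 3 - P.length = 0 := by omega
    rw [this]
    simp [List.take_take]

-- ===== VERDICT (by name: the statement is the Claim_ definition above) =====
theorem get_milestone_focus_spec : Claim_equal_get_milestone_focus := by
  intro scores _
  show get_milestone_focus scores = get_milestone_focus_alt scores
  have hnd : (((PySem.Dict.ofList scores).items).map Prod.fst).Nodup := by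
    have := PySem.Dict.nodup_keys_ofList (κ := String) (ν := String) scores
    simpa [PySem.Dict.keys] using this
  set items := (PySem.Dict.ofList scores).items with hitems
  set H := pvGrp "High" items with hH
  set L := pvGrp "Low" items with hL
  set M := pvGrp "Medium" items with hM
  set K := items.map Prod.fst with hK
  -- A's side: the candidate-stream dedup loop, then its closed form
  have hmain := pv_main H L M K
    (pv_group_nodup _ hnd _) (pv_group_nodup _ hnd _) (pv_group_nodup _ hnd _)
    (pv_group_disjoint _ hnd "Low" "High" (by decide))
    (pv_group_disjoint _ hnd "Medium" "High" (by decide))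
    (pv_group_disjoint _ hnd "Medium" "Low" (by decide))
  have hPnd : (H.take 2 ++ L.take 1 ++ M).Nodup := by
    refine List.Nodup.append (List.Nodup.append ?_ ?_ ?_) ?_ ?_
    · exact ((pv_group_nodup _ hnd "High").sublist (List.take_sublist _ _))
    · exact ((pv_group_nodup _ hnd "Low").sublist (List.take_sublist _ _))
    · intro x hx hy
      exact pv_group_disjoint _ hnd "High" "Low" (by decide) x
        (List.mem_of_mem_take hx) (List.mem_of_mem_take hy)
    · exact pv_group_nodup _ hnd "Medium"
    · intro x hx hy
      rcases List.mem_append.mp hx with hx | hx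
      · exact pv_group_disjoint _ hnd "High" "Medium" (by decide) x
          (List.mem_of_mem_take hx) hy
      · exact pv_group_disjoint _ hnd "Low" "Medium" (by decide) x
          (List.mem_of_mem_take hx) hy
  have hKnd : K.Nodup := hnd
  have hA : get_milestone_focus scores
      = ((H.take 2 ++ L.take 1 ++ M) ++ K.filter (fun k => !decide (k ∈ H.take 2 ++ L.take 1 ++ M))).take 3 := by
    have hz := pvZ (H.take 2 ++ L.take 1 ++ M) K hPnd hKnd
    rw [show (H.take 2 ++ L.take 1 ++ M) ++ K = H.take 2 ++ L.take 1 ++ M ++ K by simp] at hz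
    rw [← hz, ← hmain]
    simp only [get_milestone_focus, PySem.Dict.keys]
    rfl
  -- B's side: stable sort = bucket concatenation, buckets identified
  have hB : get_milestone_focus_alt scores
      = ((H.take 2 ++ L.take 1 ++ M) ++ K.filter (fun k => !decide (k ∈ H.take 2 ++ L.take 1 ++ M))).take 3 := by
    have hsb := pv_sorted_buckets (pvRankLoop 0 false items) (pv_rank_mem items 0 false)
    have hb0 := pv_bucket0 items 0 false
    have hb1 := pv_bucket1 items 0 false
    have hb2 := pv_bucket2 items 0 false
    have hb3 := pv_bucket3 items 0 false hnd
    simp only [get_milestone_focus_alt]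
    rw [← hitems, hsb, List.map_take, List.map_append, List.map_append, List.map_append,
      hb0, hb1, hb2, hb3]
    congr 1
    simp only [Nat.sub_zero, Bool.false_eq_true, if_false, List.append_assoc]
    congr 1
    congr 1
    congr 1
    apply List.filter_congr
    intro k _
    simp [List.mem_append, Bool.and_assoc, hH, hL, hM]
  rw [hA, hB]
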